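-- pv_equiv track=rewrite | github.com/KaiboLiu/CS519-010-ALG | hw4/nbest.py | nbestc
-- ===== SOURCE A (Python) =====
-- import heapq
--
-- p_key = lambda pair: (pair[0]+pair[1], pair[1])
--
-- def nbestc(a,b):
--     # BFS based priority queue + search histrory in set
--     # containment opertation in set is O(1)
--     n = len(a)
--     if n == 0: return a
--     A = sorted(a)
--     B = sorted(b)
--
--     h, p_set = [], set()
--     res = []
--
--     heapq.heappush(h, (p_key((A[0],B[0])), (0,0)))  # element in h is a pair (element[0], element[1]), compatiable with mult-key comparison
--                                                     # element[0] is the primary key, used to sort in h, element[1]/(i,j) is the index of pair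
--     while len(res) < n:
--         i, j = heapq.heappop(h)[1]
--         res.append((A[i],B[j]))
--         if i+1 < n and (i+1,j) not in p_set:
--             heapq.heappush(h, ( p_key((A[i+1],B[j])), (i+1,j) ))
--             p_set.add((i+1,j))
--         if j+1 < n and (i,j+1) not in p_set:
--             heapq.heappush(h, ( p_key((A[i],B[j+1])), (i,j+1) ))
--             p_set.add((i,j+1))
--     return res
-- ===== SOURCE B (Python) =====
-- def nbestc(a, b):
--     # Generate all n*n pairs from the sorted lists, stable-sort them by
--     # (sum, second element) and return the first n.
--     n = len(a)
--     if n == 0: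
--         return a
--     A = sorted(a)
--     B = sorted(b)
--     pairs = [(A[i], B[j]) for i in range(n) for j in range(n)]
--     pairs.sort(key=lambda p: (p[0] + p[1], p[1]))
--     return pairs[:n]
-- ===== Notes on version B (the rewrite author's own statement) =====
-- stated objective: simpler
-- what changed: Replaces the heap-based best-first frontier walk (priority queue plus visited set) by generating all n*n pairs from the sorted inputs, stable-sorting them once by the key (sum, second element) and returning the first n; Pre_ excludes nonempty a with len(b) < len(a), where both programs index past the end of sorted(b): B always raises IndexError there and A raises on most such inputs, accidentally returning on a few where its heap walk never reaches b's end.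
-- outside the precondition, e.g. on nbestc([0, 0, 0], [0, 100]): A returns [(0, 0), (0, 0), (0, 0)], B raises IndexError
import Mathlib
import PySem

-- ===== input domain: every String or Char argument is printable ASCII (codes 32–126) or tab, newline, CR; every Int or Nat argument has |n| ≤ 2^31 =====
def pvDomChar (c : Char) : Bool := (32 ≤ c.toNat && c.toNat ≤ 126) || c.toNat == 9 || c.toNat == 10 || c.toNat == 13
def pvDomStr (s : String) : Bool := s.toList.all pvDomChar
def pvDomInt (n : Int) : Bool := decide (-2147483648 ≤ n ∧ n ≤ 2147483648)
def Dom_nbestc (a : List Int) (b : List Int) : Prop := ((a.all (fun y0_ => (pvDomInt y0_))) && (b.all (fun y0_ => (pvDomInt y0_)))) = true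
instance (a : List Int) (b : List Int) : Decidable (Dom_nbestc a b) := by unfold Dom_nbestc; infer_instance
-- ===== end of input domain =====

-- B replaces A's heap-based best-first frontier walk by generating all n·n pairs from the
-- sorted inputs and stable-sorting them once by the key (sum, second element): simpler, not faster.

-- ===== PORT A =====
-- p_key = lambda pair: (pair[0]+pair[1], pair[1])
def pvPkey (p : Int × Int) : Int × Int := (p.1 + p.2, p.2)

-- Python's heapq holds entries ((sum, second), (i, j)) and compares them by Python's
-- lexicographic tuple order; the heap is modeled by its contract (exact here): heappush
-- appends, heappop removes the minimum under that order (all entries are distinct tuples).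
def pvEntryLt (e f : (Int × Int) × (Nat × Nat)) : Bool :=
  decide (e.1.1 < f.1.1) || (decide (e.1.1 = f.1.1) &&
    (decide (e.1.2 < f.1.2) || (decide (e.1.2 = f.1.2) &&
      (decide (e.2.1 < f.2.1) || (decide (e.2.1 = f.2.1) && decide (e.2.2 < f.2.2))))))

def pvHeapMin (m : (Int × Int) × (Nat × Nat)) (l : List ((Int × Int) × (Nat × Nat))) :
    (Int × Int) × (Nat × Nat) :=
  match l with
  | [] => m
  | x :: xs => pvHeapMin (if pvEntryLt x m then x else m) xs

def pvPop (h : List ((Int × Int) × (Nat × Nat))) :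
    Option (((Int × Int) × (Nat × Nat)) × List ((Int × Int) × (Nat × Nat))) :=
  match h with
  | [] => none
  | x :: xs => some (pvHeapMin x xs, (x :: xs).erase (pvHeapMin x xs))

-- the while loop: len(res) grows by exactly 1 each iteration, so `while len(res) < n`
-- runs exactly n times when it returns; fuel = n - len(res).
def pvLoop (A B : List Int) (n : Nat) :
    Nat → List ((Int × Int) × (Nat × Nat)) → PySem.Set (Nat × Nat) →
    List (Int × Int) → List (Int × Int)
  | 0, _, _, res => res
  | fuel+1, h, pset, res =>
    match pvPop h with
    | none => res   -- Python: heappop on an empty heap raises IndexError; unreachable inside Pre_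
    | some (e, h₁) =>
      let i := e.2.1
      let j := e.2.2
      let res' := res ++ [(A.getD i 0, B.getD j 0)]
      let s₁ := if i+1 < n && !(PySem.Set.contains pset (i+1, j)) then
          (h₁ ++ [(pvPkey (A.getD (i+1) 0, B.getD j 0), (i+1, j))], PySem.Set.add pset (i+1, j))
        else (h₁, pset)
      let s₂ := if j+1 < n && !(PySem.Set.contains s₁.2 (i, j+1)) then
          (s₁.1 ++ [(pvPkey (A.getD i 0, B.getD (j+1) 0), (i, j+1))], PySem.Set.add s₁.2 (i, j+1))
        else s₁
      pvLoop A B n fuel s₂.1 s₂.2 res'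

-- list indexing A[i], B[j] is ported as getD: under Pre_ every index used is in range.
def nbestc (a : List Int) (b : List Int) : List (Int × Int) :=
  let n := a.length
  if n = 0 then a
  else
    let A := PySem.List.sorted a (fun x => x) false
    let B := PySem.List.sorted b (fun x => x) false
    pvLoop A B n n [(pvPkey (A.getD 0 0, B.getD 0 0), (0, 0))] PySem.Set.empty []

-- ===== PORT B =====
def nbestc_alt (a : List Int) (b : List Int) : List (Int × Int) :=
  let n := a.length
  if n = 0 then a
  else
    let A := PySem.List.sorted a (fun x => x) false
    let B := PySem.List.sorted b (fun x => x) false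
    let pairs := (List.range n).flatMap (fun i => (List.range n).map (fun j => (A.getD i 0, B.getD j 0)))
    let sortedPairs := PySem.List.sorted2 pairs (fun p => p.1 + p.2) (fun p => p.2) false
    PySem.List.slice sortedPairs none (some (n : Int))   -- pairs[:n]

-- ===== PRECONDITION & SPEC =====
-- Pre_ excludes nonempty a with len(b) < len(a): there both programs index past the end of
-- sorted(b); B always raises IndexError, A raises on most such inputs and accidentally
-- returns on a few where its heap walk never reaches b's end.
def Pre_nbestc (a : List Int) (b : List Int) : Prop := a = [] ∨ a.length ≤ b.length
instance (a : List Int) (b : List Int) : Decidable (Pre_nbestc a b) := by unfold Pre_nbestc; infer_instance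

def pvWitness_nbestc : List Int × List Int := ([5, 1, 3], [4, 2, 9])

def Spec_nbestc (a : List Int) (b : List Int) (out : List (Int × Int)) : Prop := out = nbestc_alt a b
instance (a : List Int) (b : List Int) (out : List (Int × Int)) : Decidable (Spec_nbestc a b out) := by unfold Spec_nbestc; infer_instance

-- ===== CLAIM (what is proved, stated in full; the proofs are below) =====
def Claim_equal_nbestc : Prop := ∀ (a : List Int) (b : List Int), Dom_nbestc a b → Pre_nbestc a b → Spec_nbestc a b (nbestc a b)

-- ===== LEMMAS AND PROOFS =====

-- value of an index pair, Python sort key of a value pair, full heap-entry order key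
def pvVal (A B : List Int) (p : Nat × Nat) : Int × Int := (A.getD p.1 0, B.getD p.2 0)

def pvKey2 (p : Int × Int) : Int ×ₗ Int := toLex (p.1 + p.2, p.2)

def pvEnt (A B : List Int) (p : Nat × Nat) : (Int × Int) × (Nat × Nat) :=
  ((A.getD p.1 0 + B.getD p.2 0, B.getD p.2 0), p)

def pvToLex (e : (Int × Int) × (Nat × Nat)) : (Int ×ₗ Int) ×ₗ (Nat ×ₗ Nat) :=
  toLex (toLex e.1, toLex e.2)

def pvF (A B : List Int) (p : Nat × Nat) : (Int ×ₗ Int) ×ₗ (Nat ×ₗ Nat) :=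
  pvToLex (pvEnt A B p)

def pvGrid (n : Nat) : List (Nat × Nat) :=
  (List.range n).flatMap (fun i => (List.range n).map (fun j => (i, j)))

def pvSortedG (A B : List Int) (n : Nat) : List (Nat × Nat) :=
  PySem.List.sorted (pvGrid n) (pvF A B) false

-- indices ever pushed after t pops (popped staircase = first t of pvSortedG)
def pvQ (A B : List Int) (n t : Nat) (p : Nat × Nat) : Prop :=
  p = (0, 0) ∨ ∃ q ∈ (pvSortedG A B n).take t,
    (p = (q.1 + 1, q.2) ∧ q.1 + 1 < n) ∨ (p = (q.1, q.2 + 1) ∧ q.2 + 1 < n)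

-- loop invariant after t pops
def pvInv (A B : List Int) (n t : Nat) (h : List ((Int × Int) × (Nat × Nat)))
    (ps : PySem.Set (Nat × Nat)) (res : List (Int × Int)) : Prop :=
  res = ((pvSortedG A B n).take t).map (pvVal A B) ∧
  (∃ idxs : List (Nat × Nat), h = idxs.map (pvEnt A B) ∧ idxs.Nodup ∧
     ∀ p, p ∈ idxs ↔ pvQ A B n t p ∧ p ∉ (pvSortedG A B n).take t) ∧
  (∀ p : Nat × Nat, p ∈ ps ↔ pvQ A B n t p ∧ p ≠ (0, 0)) ∧
  (∀ p ∈ (pvSortedG A B n).take t, pvQ A B n t p)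

lemma pvEntryLt_iff (e f : (Int × Int) × (Nat × Nat)) :
    pvEntryLt e f = true ↔ pvToLex e < pvToLex f := by
  simp only [pvEntryLt, pvToLex, Bool.or_eq_true, Bool.and_eq_true, decide_eq_true_eq,
    Prod.Lex.toLex_lt_toLex, toLex_inj, Prod.ext_iff]
  omega

lemma pvEnt_injective (A B : List Int) : Function.Injective (pvEnt A B) :=
  fun _ _ h => congrArg Prod.snd h

lemma pvF_injective (A B : List Int) : Function.Injective (pvF A B) := by
  intro p q h
  have h2 := congrArg (fun x => ofLex (ofLex x).2) h
  simpa [pvF, pvToLex, pvEnt] using h2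

lemma pvKey2_injective : Function.Injective pvKey2 := by
  intro p q h
  simp only [pvKey2, toLex_inj, Prod.ext_iff] at h
  exact Prod.ext_iff.mpr ⟨by omega, h.2⟩

lemma mem_pvGrid (n : Nat) (p : Nat × Nat) : p ∈ pvGrid n ↔ p.1 < n ∧ p.2 < n := by
  simp only [pvGrid, List.mem_flatMap, List.mem_map, List.mem_range]
  constructor
  · rintro ⟨i, hi, j, hj, rfl⟩; exact ⟨hi, hj⟩
  · rintro ⟨h1, h2⟩; exact ⟨p.1, h1, p.2, h2, rfl⟩

lemma nodup_pvGrid (n : Nat) : (pvGrid n).Nodup := by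
  have h : pvGrid n = List.range n ×ˢ List.range n := rfl
  rw [h]
  exact (List.nodup_range).product (List.nodup_range)

lemma nodup_pvSortedG (A B : List Int) (n : Nat) : (pvSortedG A B n).Nodup :=
  ((PySem.List.sorted_perm (pvGrid n) (pvF A B) false).nodup_iff).mpr (nodup_pvGrid n)

lemma mem_pvSortedG (A B : List Int) (n : Nat) (p : Nat × Nat) :
    p ∈ pvSortedG A B n ↔ p.1 < n ∧ p.2 < n := by
  rw [pvSortedG, PySem.List.mem_sorted, mem_pvGrid]

lemma length_pvSortedG (A B : List Int) (n : Nat) : (pvSortedG A B n).length = n * n := by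
  rw [pvSortedG, PySem.List.length_sorted]
  simp [pvGrid]

lemma pvNotMemTake (A B : List Int) (n t : Nat) (ht : t < (pvSortedG A B n).length) :
    (pvSortedG A B n)[t] ∉ (pvSortedG A B n).take t := by
  intro hmem
  obtain ⟨s, hs, hgs⟩ := List.mem_take_iff_getElem.mp hmem
  have := ((nodup_pvSortedG A B n).getElem_inj_iff).mp hgs
  omega

-- any grid point strictly below sortedG[t] in the pvF order is among the first t
lemma pvRank (A B : List Int) (n t : Nat) (ht : t < (pvSortedG A B n).length)
    (y : Nat × Nat) (hy : y ∈ pvGrid n)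
    (hlt : pvF A B y < pvF A B ((pvSortedG A B n)[t])) :
    y ∈ (pvSortedG A B n).take t := by
  have hmem : y ∈ pvSortedG A B n := by
    rw [pvSortedG, PySem.List.mem_sorted]; exact hy
  obtain ⟨s, hs, hgs⟩ := List.mem_iff_getElem.mp hmem
  by_cases hst : s < t
  · exact List.mem_take_iff_getElem.mpr ⟨s, by omega, hgs⟩
  · exfalso
    have hmono : pvF A B ((pvSortedG A B n)[t]) ≤ pvF A B ((pvSortedG A B n)[s]) :=
      PySem.List.key_sorted_getElem_mono (pvGrid n) (pvF A B) (by omega) hs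
    rw [hgs] at hmono
    exact absurd hlt (not_lt.mpr hmono)

-- conversely: anything in the grid but not among the first t is ≥ sortedG[t]
lemma pvRank_ge (A B : List Int) (n t : Nat) (ht : t < (pvSortedG A B n).length)
    (y : Nat × Nat) (hy : y ∈ pvGrid n) (hny : y ∉ (pvSortedG A B n).take t) :
    pvF A B ((pvSortedG A B n)[t]) ≤ pvF A B y := by
  have hmem : y ∈ pvSortedG A B n := by
    rw [pvSortedG, PySem.List.mem_sorted]; exact hy
  obtain ⟨s, hs, hgs⟩ := List.mem_iff_getElem.mp hmem
  by_cases hst : s < t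
  · exact absurd (List.mem_take_iff_getElem.mpr ⟨s, by omega, hgs⟩) hny
  · have hmono : pvF A B ((pvSortedG A B n)[t]) ≤ pvF A B ((pvSortedG A B n)[s]) :=
      PySem.List.key_sorted_getElem_mono (pvGrid n) (pvF A B) (by omega) hs
    rwa [hgs] at hmono

lemma pvHeapMin_spec (m : (Int × Int) × (Nat × Nat)) (l : List ((Int × Int) × (Nat × Nat))) :
    pvHeapMin m l ∈ m :: l ∧ ∀ y ∈ m :: l, pvToLex (pvHeapMin m l) ≤ pvToLex y := by
  induction l generalizing m with
  | nil => simp [pvHeapMin]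
  | cons x xs ih =>
    obtain ⟨hmem, hle⟩ := ih (if pvEntryLt x m then x else m)
    have hhead : pvToLex (if pvEntryLt x m then x else m) ≤ pvToLex m ∧
        pvToLex (if pvEntryLt x m then x else m) ≤ pvToLex x := by
      by_cases hxm : pvEntryLt x m = true
      · rw [if_pos hxm]
        exact ⟨le_of_lt ((pvEntryLt_iff x m).mp hxm), le_refl _⟩
      · rw [if_neg hxm]
        refine ⟨le_refl _, ?_⟩
        have := (pvEntryLt_iff x m).not.mp (by simpa using hxm)
        exact le_of_not_gt this
    have hstep : pvHeapMin m (x :: xs) = pvHeapMin (if pvEntryLt x m then x else m) xs := rfl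
    rw [hstep]
    constructor
    · rcases List.mem_cons.mp hmem with h | h
      · rw [h]
        split <;> simp
      · simp [h]
    · intro y hy
      have hminhead := hle _ (List.mem_cons_self)
      rcases List.mem_cons.mp hy with rfl | hy'
      · exact hminhead.trans hhead.1
      · rcases List.mem_cons.mp hy' with rfl | hy''
        · exact hminhead.trans hhead.2
        · exact hle _ (List.mem_cons_of_mem _ hy'')

lemma pvPop_spec (A B : List Int) (idxs : List (Nat × Nat)) (x : Nat × Nat)
    (hnd : idxs.Nodup) (hx : x ∈ idxs) (hmin : ∀ p ∈ idxs, pvF A B x ≤ pvF A B p) :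
    pvPop (idxs.map (pvEnt A B)) = some (pvEnt A B x, (idxs.erase x).map (pvEnt A B)) := by
  match hidx : idxs with
  | [] => exact absurd hx (List.not_mem_nil)
  | i0 :: rest =>
    have hmap : (i0 :: rest).map (pvEnt A B) = pvEnt A B i0 :: rest.map (pvEnt A B) := rfl
    obtain ⟨hmem, hle⟩ := pvHeapMin_spec (pvEnt A B i0) (rest.map (pvEnt A B))
    set m := pvHeapMin (pvEnt A B i0) (rest.map (pvEnt A B)) with hm
    have hmem' : m ∈ (i0 :: rest).map (pvEnt A B) := hmem
    obtain ⟨p0, hp0, hpm⟩ := List.mem_map.mp hmem'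
    have h1 : pvF A B p0 ≤ pvF A B x := by
      have hthis := hle (pvEnt A B x) (List.mem_map.mpr ⟨x, hx, rfl⟩)
      rw [← hpm] at hthis
      exact hthis
    have h2 : pvF A B x ≤ pvF A B p0 := hmin p0 hp0
    have hpx : p0 = x := (pvF_injective A B (le_antisymm h2 h1)).symm
    have hmx : m = pvEnt A B x := by rw [← hpm, hpx]
    have : pvPop ((i0 :: rest).map (pvEnt A B))
        = some (m, ((i0 :: rest).map (pvEnt A B)).erase m) := rfl
    rw [this, hmx, ← List.map_erase (pvEnt_injective A B)]

-- monotone access into a sorted list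
lemma pvMono (L : List Int) (hL : L.Pairwise (· ≤ ·)) (i i' : Nat) (hii : i ≤ i')
    (hi' : i' < L.length) : L.getD i 0 ≤ L.getD i' 0 := by
  rcases Nat.lt_or_ge i i' with hlt | hge
  · rw [List.getD_eq_getElem _ _ (by omega), List.getD_eq_getElem _ _ hi']
    exact List.pairwise_iff_getElem.mp hL i i' (by omega) hi' hlt
  · have : i = i' := by omega
    rw [this]

lemma pvKey2_le (u v : Int × Int) (h1 : u.1 + u.2 ≤ v.1 + v.2)
    (h2 : u.1 + u.2 = v.1 + v.2 → u.2 ≤ v.2) : pvKey2 u ≤ pvKey2 v := by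
  rw [pvKey2, pvKey2, Prod.Lex.toLex_le_toLex]
  dsimp only
  omega

lemma pvF_eq_toLex (A B : List Int) (p : Nat × Nat) :
    pvF A B p = toLex (pvKey2 (pvVal A B p), toLex p) := rfl

lemma pvF_lt_of (A B : List Int) (p q : Nat × Nat)
    (hkey : pvKey2 (pvVal A B p) ≤ pvKey2 (pvVal A B q))
    (hidx : toLex p < toLex q) : pvF A B p < pvF A B q := by
  rw [pvF_eq_toLex, pvF_eq_toLex, Prod.Lex.toLex_lt_toLex]
  rcases lt_or_eq_of_le hkey with h | h
  · exact Or.inl h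
  · exact Or.inr ⟨h, hidx⟩

lemma pvKey2_le_of_pvF_le (A B : List Int) (p q : Nat × Nat)
    (h : pvF A B p ≤ pvF A B q) : pvKey2 (pvVal A B p) ≤ pvKey2 (pvVal A B q) := by
  rw [pvF_eq_toLex, pvF_eq_toLex, Prod.Lex.toLex_le_toLex] at h
  rcases h with h | h
  · exact le_of_lt h
  · exact le_of_eq h.1

lemma pvQ_grid (A B : List Int) (n t : Nat) (hn : 0 < n) (p : Nat × Nat)
    (hp : pvQ A B n t p) : p ∈ pvGrid n := by
  rw [mem_pvGrid]
  rcases hp with rfl | ⟨q, hq, hcase⟩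
  · exact ⟨hn, hn⟩
  · have hqg : q.1 < n ∧ q.2 < n := by
      rw [← mem_pvSortedG A B n]
      exact List.take_subset _ _ hq
    rcases hcase with ⟨rfl, hb⟩ | ⟨rfl, hb⟩
    · exact ⟨hb, hqg.2⟩
    · exact ⟨hqg.1, hb⟩

lemma pvTake_succ (A B : List Int) (n t : Nat) (ht : t < (pvSortedG A B n).length) :
    (pvSortedG A B n).take (t+1) = (pvSortedG A B n).take t ++ [(pvSortedG A B n)[t]] := by
  rw [List.take_add_one, List.getElem?_eq_getElem ht]
  rfl

lemma pvQ_succ (A B : List Int) (n t : Nat) (ht : t < (pvSortedG A B n).length)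
    (p : Nat × Nat) :
    pvQ A B n (t+1) p ↔ pvQ A B n t p ∨
      (p = (((pvSortedG A B n)[t]).1 + 1, ((pvSortedG A B n)[t]).2) ∧ ((pvSortedG A B n)[t]).1 + 1 < n) ∨
      (p = (((pvSortedG A B n)[t]).1, ((pvSortedG A B n)[t]).2 + 1) ∧ ((pvSortedG A B n)[t]).2 + 1 < n) := by
  rw [pvQ, pvQ, pvTake_succ A B n t ht]
  constructor
  · rintro (rfl | ⟨q, hq, hc⟩)
    · exact Or.inl (Or.inl rfl)
    · rcases List.mem_append.mp hq with hq' | hq'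
      · exact Or.inl (Or.inr ⟨q, hq', hc⟩)
      · rw [List.mem_singleton] at hq'
        subst hq'
        rcases hc with h | h
        · exact Or.inr (Or.inl h)
        · exact Or.inr (Or.inr h)
  · rintro ((rfl | ⟨q, hq, hc⟩) | h | h)
    · exact Or.inl rfl
    · exact Or.inr ⟨q, List.mem_append.mpr (Or.inl hq), hc⟩
    · exact Or.inr ⟨(pvSortedG A B n)[t], List.mem_append.mpr (Or.inr (List.mem_singleton_self _)), Or.inl h⟩
    · exact Or.inr ⟨(pvSortedG A B n)[t], List.mem_append.mpr (Or.inr (List.mem_singleton_self _)), Or.inr h⟩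

lemma pvXQ (A B : List Int) (n t : Nat) (ht : t < n)
    (hAl : n ≤ A.length) (hBl : n ≤ B.length)
    (hA : A.Pairwise (· ≤ ·)) (hB : B.Pairwise (· ≤ ·))
    (hlen : t < (pvSortedG A B n).length) :
    pvQ A B n t ((pvSortedG A B n)[t]) := by
  have hxb := (mem_pvSortedG A B n _).mp (List.getElem_mem hlen)
  set x := (pvSortedG A B n)[t] with hxdef
  by_cases h1 : x.1 = 0
  · by_cases h2 : x.2 = 0
    · exact Or.inl (Prod.ext_iff.mpr ⟨h1, h2⟩)
    · refine Or.inr ⟨(x.1, x.2 - 1), ?_, Or.inr ⟨Prod.ext_iff.mpr ⟨rfl, by omega⟩, by omega⟩⟩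
      apply pvRank A B n t hlen (x.1, x.2 - 1) ((mem_pvGrid n (x.1, x.2 - 1)).mpr ⟨hxb.1, by omega⟩)
      rw [← hxdef]
      have hm := pvMono B hB (x.2 - 1) x.2 (by omega) (by omega)
      apply pvF_lt_of
      · apply pvKey2_le
        · simp only [pvVal]
          omega
        · intro _
          simp only [pvVal]
          exact hm
      · rw [Prod.Lex.toLex_lt_toLex]
        exact Or.inr ⟨rfl, by omega⟩
  · refine Or.inr ⟨(x.1 - 1, x.2), ?_, Or.inl ⟨Prod.ext_iff.mpr ⟨by omega, rfl⟩, by omega⟩⟩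
    apply pvRank A B n t hlen (x.1 - 1, x.2) ((mem_pvGrid n (x.1 - 1, x.2)).mpr ⟨by omega, hxb.2⟩)
    rw [← hxdef]
    have hm := pvMono A hA (x.1 - 1) x.1 (by omega) (by omega)
    apply pvF_lt_of
    · apply pvKey2_le
      · simp only [pvVal]
        omega
      · intro _
        simp only [pvVal]
        exact le_refl _
    · rw [Prod.Lex.toLex_lt_toLex]
      exact Or.inl (by omega)

lemma pvStep (A B : List Int) (n t : Nat) (hn : 0 < n) (ht : t < n)
    (hAl : n ≤ A.length) (hBl : n ≤ B.length)
    (hA : A.Pairwise (· ≤ ·)) (hB : B.Pairwise (· ≤ ·))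
    (fuel : Nat) (h : List ((Int × Int) × (Nat × Nat))) (ps : PySem.Set (Nat × Nat))
    (res : List (Int × Int)) (hinv : pvInv A B n t h ps res) :
    ∃ h' ps' res', pvLoop A B n (fuel+1) h ps res = pvLoop A B n fuel h' ps' res' ∧
      pvInv A B n (t+1) h' ps' res' := by
  obtain ⟨hres, ⟨idxs, hh, hnd, hidx⟩, hps, hT⟩ := hinv
  have hlen : t < (pvSortedG A B n).length := by
    rw [length_pvSortedG]
    exact lt_of_lt_of_le ht (Nat.le_mul_of_pos_left n hn)
  have hxQ : pvQ A B n t ((pvSortedG A B n)[t]) := pvXQ A B n t ht hAl hBl hA hB hlen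
  have hxT := pvNotMemTake A B n t hlen
  have htake1 := pvTake_succ A B n t hlen
  have hQ1 := pvQ_succ A B n t hlen
  set x : Nat × Nat := (pvSortedG A B n)[t] with hxdef
  have hxidxs : x ∈ idxs := (hidx x).mpr ⟨hxQ, hxT⟩
  have hminx : ∀ p ∈ idxs, pvF A B x ≤ pvF A B p := fun p hp =>
    pvRank_ge A B n t hlen p (pvQ_grid A B n t hn p ((hidx p).mp hp).1) ((hidx p).mp hp).2
  have hpop : pvPop h = some (pvEnt A B x, (idxs.erase x).map (pvEnt A B)) := by
    rw [hh]; exact pvPop_spec A B idxs x hnd hxidxs hminx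
  have hmemT1 : ∀ p : Nat × Nat, p ∈ (pvSortedG A B n).take (t+1) ↔
      p ∈ (pvSortedG A B n).take t ∨ p = x := by
    intro p; rw [htake1]; simp
  have hT' : ∀ p ∈ (pvSortedG A B n).take (t+1), pvQ A B n (t+1) p := by
    intro p hp
    rcases (hmemT1 p).mp hp with hmem | heq
    · exact (hQ1 p).mpr (Or.inl (hT p hmem))
    · exact (hQ1 p).mpr (Or.inl (by rw [heq]; exact hxQ))
  have hres' : res ++ [(A.getD x.1 0, B.getD x.2 0)]
      = ((pvSortedG A B n).take (t+1)).map (pvVal A B) := by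
    rw [htake1, List.map_append, hres]
    rfl
  have herase : ∀ p : Nat × Nat, p ∈ idxs.erase x ↔ (p ≠ x ∧ p ∈ idxs) :=
    fun p => hnd.mem_erase_iff
  have hQidxs : ∀ p ∈ idxs, pvQ A B n t p := fun p hp => ((hidx p).mp hp).1
  have hu1nx : ((x.1+1, x.2) : Nat × Nat) ≠ x := fun hc => by
    have hc1 := congrArg Prod.fst hc; simp at hc1
  have hu2nx : ((x.1, x.2+1) : Nat × Nat) ≠ x := fun hc => by
    have hc1 := congrArg Prod.snd hc; simp at hc1
  have hcont1 : (PySem.Set.contains ps (x.1 + 1, x.2) = true) ↔ pvQ A B n t (x.1 + 1, x.2) := by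
    rw [show (PySem.Set.contains ps (x.1 + 1, x.2) = true ↔ (x.1 + 1, x.2) ∈ ps) from
      List.contains_iff_mem, hps]
    exact ⟨fun hc => hc.1, fun hc => ⟨hc, by simp⟩⟩
  have hE1 : (pvEnt A B x).2.1 = x.1 := rfl
  have hE2 : (pvEnt A B x).2.2 = x.2 := rfl
  by_cases hC1 : x.1 + 1 < n ∧ ¬ pvQ A B n t (x.1 + 1, x.2)
  · -- u1 is pushed
    have hg1 : (decide (x.1 + 1 < n) && !PySem.Set.contains ps (x.1 + 1, x.2)) = true := by
      have hcf : PySem.Set.contains ps (x.1 + 1, x.2) = false := by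
        cases hcc : PySem.Set.contains ps (x.1 + 1, x.2)
        · rfl
        · exact absurd (hcont1.mp hcc) hC1.2
      rw [Bool.and_eq_true, Bool.not_eq_true']
      exact ⟨decide_eq_true hC1.1, hcf⟩
    have hcont2 : (PySem.Set.contains (PySem.Set.add ps (x.1+1, x.2)) (x.1, x.2+1) = true)
        ↔ pvQ A B n t (x.1, x.2+1) := by
      rw [show (PySem.Set.contains (PySem.Set.add ps (x.1+1, x.2)) (x.1, x.2+1) = true
          ↔ (x.1, x.2+1) ∈ PySem.Set.add ps (x.1+1, x.2)) from List.contains_iff_mem,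
        PySem.Set.mem_add, hps]
      constructor
      · rintro (hc | hc)
        · exact hc.1
        · exact absurd (congrArg Prod.fst hc) (by simp)
      · intro hc
        exact Or.inl ⟨hc, by simp⟩
    by_cases hC2 : x.2 + 1 < n ∧ ¬ pvQ A B n t (x.1, x.2 + 1)
    · have hg2 : (decide (x.2 + 1 < n) && !PySem.Set.contains (PySem.Set.add ps (x.1+1, x.2)) (x.1, x.2+1)) = true := by
        have hcf : PySem.Set.contains (PySem.Set.add ps (x.1+1, x.2)) (x.1, x.2+1) = false := by
          cases hcc : PySem.Set.contains (PySem.Set.add ps (x.1+1, x.2)) (x.1, x.2+1)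
          · rfl
          · exact absurd (hcont2.mp hcc) hC2.2
        rw [Bool.and_eq_true, Bool.not_eq_true']
        exact ⟨decide_eq_true hC2.1, hcf⟩
      refine ⟨((idxs.erase x).map (pvEnt A B) ++ [pvEnt A B (x.1+1, x.2)]) ++ [pvEnt A B (x.1, x.2+1)],
        PySem.Set.add (PySem.Set.add ps (x.1+1, x.2)) (x.1, x.2+1),
        res ++ [(A.getD x.1 0, B.getD x.2 0)], ?_, ?_⟩
      · simp only [pvLoop, hpop, hE1, hE2]
        rw [if_pos hg1]
        dsimp only
        rw [if_pos hg2]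
        rfl
      · refine ⟨hres', ⟨(idxs.erase x ++ [(x.1+1, x.2)]) ++ [(x.1, x.2+1)],
          by simp [List.map_append, pvEnt], ?_, ?_⟩, ?_, hT'⟩
        · have h1 : (idxs.erase x).Nodup := hnd.erase x
          have hu1notin : ((x.1+1, x.2) : Nat × Nat) ∉ idxs.erase x :=
            fun hmem => hC1.2 (hQidxs _ ((herase _).mp hmem).2)
          have hu2notin : ((x.1, x.2+1) : Nat × Nat) ∉ idxs.erase x :=
            fun hmem => hC2.2 (hQidxs _ ((herase _).mp hmem).2)
          have hne : ((x.1, x.2+1) : Nat × Nat) ≠ (x.1+1, x.2) := by simp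
          have d1 : (idxs.erase x).Disjoint [((x.1+1, x.2) : Nat × Nat)] := by
            intro a ha hb
            rw [List.mem_singleton] at hb; subst hb
            exact hu1notin ha
          have d2 : ((idxs.erase x) ++ [((x.1+1, x.2) : Nat × Nat)]).Disjoint [((x.1, x.2+1) : Nat × Nat)] := by
            intro a ha hb
            rw [List.mem_singleton] at hb; subst hb
            rcases List.mem_append.mp ha with hc | hc
            · exact hu2notin hc
            · exact hne (List.mem_singleton.mp hc)
          exact (h1.append (List.nodup_singleton _) d1).append (List.nodup_singleton _) d2
        · intro p
          constructor
          · intro hp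
            rcases List.mem_append.mp hp with hp | hp
            · rcases List.mem_append.mp hp with hp | hp
              · obtain ⟨hpx, hpid⟩ := (herase p).mp hp
                obtain ⟨hpQ, hpT⟩ := (hidx p).mp hpid
                refine ⟨(hQ1 p).mpr (Or.inl hpQ), fun hmem => ?_⟩
                rcases (hmemT1 p).mp hmem with hc | hc
                · exact hpT hc
                · exact hpx hc
              · rw [List.mem_singleton] at hp; subst hp
                refine ⟨(hQ1 _).mpr (Or.inr (Or.inl ⟨rfl, hC1.1⟩)), fun hmem => ?_⟩
                rcases (hmemT1 _).mp hmem with hc | hc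
                · exact hC1.2 (hT _ hc)
                · exact hu1nx hc
            · rw [List.mem_singleton] at hp; subst hp
              refine ⟨(hQ1 _).mpr (Or.inr (Or.inr ⟨rfl, hC2.1⟩)), fun hmem => ?_⟩
              rcases (hmemT1 _).mp hmem with hc | hc
              · exact hC2.2 (hT _ hc)
              · exact hu2nx hc
          · rintro ⟨hpQ, hpT⟩
            rcases (hQ1 p).mp hpQ with hq | hq | hq
            · have hpx : p ≠ x := fun hc => hpT ((hmemT1 p).mpr (Or.inr hc))
              have hpid : p ∈ idxs := (hidx p).mpr
                ⟨hq, fun hmem => hpT ((hmemT1 p).mpr (Or.inl hmem))⟩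
              exact List.mem_append.mpr (Or.inl (List.mem_append.mpr
                (Or.inl ((herase p).mpr ⟨hpx, hpid⟩))))
            · exact List.mem_append.mpr (Or.inl (List.mem_append.mpr
                (Or.inr (List.mem_singleton.mpr hq.1))))
            · exact List.mem_append.mpr (Or.inr (List.mem_singleton.mpr hq.1))
        · intro p
          rw [PySem.Set.mem_add, PySem.Set.mem_add, hps p]
          constructor
          · rintro ((⟨hq, hne⟩ | rfl) | rfl)
            · exact ⟨(hQ1 p).mpr (Or.inl hq), hne⟩
            · exact ⟨(hQ1 _).mpr (Or.inr (Or.inl ⟨rfl, hC1.1⟩)), by simp⟩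
            · exact ⟨(hQ1 _).mpr (Or.inr (Or.inr ⟨rfl, hC2.1⟩)), by simp⟩
          · rintro ⟨hpQ, hne⟩
            rcases (hQ1 p).mp hpQ with hq | hq | hq
            · exact Or.inl (Or.inl ⟨hq, hne⟩)
            · exact Or.inl (Or.inr hq.1)
            · exact Or.inr hq.1
    · -- u1 pushed, u2 not
      have hg2 : ¬ ((decide (x.2 + 1 < n) && !PySem.Set.contains (PySem.Set.add ps (x.1+1, x.2)) (x.1, x.2+1)) = true) := by
        intro hg
        rw [Bool.and_eq_true, Bool.not_eq_true'] at hg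
        refine hC2 ⟨of_decide_eq_true hg.1, fun hq => ?_⟩
        rw [hcont2.mpr hq] at hg
        exact absurd hg.2 (by simp)
      refine ⟨(idxs.erase x).map (pvEnt A B) ++ [pvEnt A B (x.1+1, x.2)],
        PySem.Set.add ps (x.1+1, x.2),
        res ++ [(A.getD x.1 0, B.getD x.2 0)], ?_, ?_⟩
      · simp only [pvLoop, hpop, hE1, hE2]
        rw [if_pos hg1]
        dsimp only
        rw [if_neg hg2]
        rfl
      · refine ⟨hres', ⟨idxs.erase x ++ [(x.1+1, x.2)],
          by simp [List.map_append, pvEnt], ?_, ?_⟩, ?_, hT'⟩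
        · have h1 : (idxs.erase x).Nodup := hnd.erase x
          have hu1notin : ((x.1+1, x.2) : Nat × Nat) ∉ idxs.erase x :=
            fun hmem => hC1.2 (hQidxs _ ((herase _).mp hmem).2)
          have d1 : (idxs.erase x).Disjoint [((x.1+1, x.2) : Nat × Nat)] := by
            intro a ha hb
            rw [List.mem_singleton] at hb; subst hb
            exact hu1notin ha
          exact h1.append (List.nodup_singleton _) d1
        · intro p
          have hnC2 : x.2 + 1 < n → pvQ A B n t (x.1, x.2 + 1) := by
            intro hb
            by_contra hq
            exact hC2 ⟨hb, hq⟩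
          constructor
          · intro hp
            rcases List.mem_append.mp hp with hp | hp
            · obtain ⟨hpx, hpid⟩ := (herase p).mp hp
              obtain ⟨hpQ, hpT⟩ := (hidx p).mp hpid
              refine ⟨(hQ1 p).mpr (Or.inl hpQ), fun hmem => ?_⟩
              rcases (hmemT1 p).mp hmem with hc | hc
              · exact hpT hc
              · exact hpx hc
            · rw [List.mem_singleton] at hp; subst hp
              refine ⟨(hQ1 _).mpr (Or.inr (Or.inl ⟨rfl, hC1.1⟩)), fun hmem => ?_⟩
              rcases (hmemT1 _).mp hmem with hc | hc
              · exact hC1.2 (hT _ hc)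
              · exact hu1nx hc
          · rintro ⟨hpQ, hpT⟩
            have hpx : p ≠ x := fun hc => hpT ((hmemT1 p).mpr (Or.inr hc))
            have hfromQ : pvQ A B n t p → p ∈ idxs.erase x ++ [(x.1+1, x.2)] := by
              intro hq
              have hpid : p ∈ idxs := (hidx p).mpr
                ⟨hq, fun hmem => hpT ((hmemT1 p).mpr (Or.inl hmem))⟩
              exact List.mem_append.mpr (Or.inl ((herase p).mpr ⟨hpx, hpid⟩))
            rcases (hQ1 p).mp hpQ with hq | hq | hq
            · exact hfromQ hq
            · exact List.mem_append.mpr (Or.inr (List.mem_singleton.mpr hq.1))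
            · exact hfromQ (hq.1 ▸ hnC2 hq.2)
        · intro p
          rw [PySem.Set.mem_add, hps p]
          have hnC2 : x.2 + 1 < n → pvQ A B n t (x.1, x.2 + 1) := by
            intro hb
            by_contra hq
            exact hC2 ⟨hb, hq⟩
          constructor
          · rintro (⟨hq, hne⟩ | rfl)
            · exact ⟨(hQ1 p).mpr (Or.inl hq), hne⟩
            · exact ⟨(hQ1 _).mpr (Or.inr (Or.inl ⟨rfl, hC1.1⟩)), by simp⟩
          · rintro ⟨hpQ, hne⟩
            rcases (hQ1 p).mp hpQ with hq | hq | hq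
            · exact Or.inl ⟨hq, hne⟩
            · exact Or.inr hq.1
            · exact Or.inl ⟨hq.1 ▸ hnC2 hq.2, hne⟩
  · -- u1 not pushed
    have hnC1 : x.1 + 1 < n → pvQ A B n t (x.1 + 1, x.2) := by
      intro hb
      by_contra hq
      exact hC1 ⟨hb, hq⟩
    have hg1 : ¬ ((decide (x.1 + 1 < n) && !PySem.Set.contains ps (x.1 + 1, x.2)) = true) := by
      intro hg
      rw [Bool.and_eq_true, Bool.not_eq_true'] at hg
      refine hC1 ⟨of_decide_eq_true hg.1, fun hq => ?_⟩
      rw [hcont1.mpr hq] at hg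
      exact absurd hg.2 (by simp)
    have hcont2 : (PySem.Set.contains ps (x.1, x.2+1) = true) ↔ pvQ A B n t (x.1, x.2+1) := by
      rw [show (PySem.Set.contains ps (x.1, x.2+1) = true ↔ (x.1, x.2+1) ∈ ps) from
        List.contains_iff_mem, hps]
      exact ⟨fun hc => hc.1, fun hc => ⟨hc, by simp⟩⟩
    by_cases hC2 : x.2 + 1 < n ∧ ¬ pvQ A B n t (x.1, x.2 + 1)
    · have hg2 : (decide (x.2 + 1 < n) && !PySem.Set.contains ps (x.1, x.2+1)) = true := by
        have hcf : PySem.Set.contains ps (x.1, x.2+1) = false := by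
          cases hcc : PySem.Set.contains ps (x.1, x.2+1)
          · rfl
          · exact absurd (hcont2.mp hcc) hC2.2
        rw [Bool.and_eq_true, Bool.not_eq_true']
        exact ⟨decide_eq_true hC2.1, hcf⟩
      refine ⟨(idxs.erase x).map (pvEnt A B) ++ [pvEnt A B (x.1, x.2+1)],
        PySem.Set.add ps (x.1, x.2+1),
        res ++ [(A.getD x.1 0, B.getD x.2 0)], ?_, ?_⟩
      · simp only [pvLoop, hpop, hE1, hE2]
        rw [if_neg hg1]
        dsimp only
        rw [if_pos hg2]
        rfl
      · refine ⟨hres', ⟨idxs.erase x ++ [(x.1, x.2+1)],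
          by simp [List.map_append, pvEnt], ?_, ?_⟩, ?_, hT'⟩
        · have h1 : (idxs.erase x).Nodup := hnd.erase x
          have hu2notin : ((x.1, x.2+1) : Nat × Nat) ∉ idxs.erase x :=
            fun hmem => hC2.2 (hQidxs _ ((herase _).mp hmem).2)
          have d1 : (idxs.erase x).Disjoint [((x.1, x.2+1) : Nat × Nat)] := by
            intro a ha hb
            rw [List.mem_singleton] at hb; subst hb
            exact hu2notin ha
          exact h1.append (List.nodup_singleton _) d1
        · intro p
          constructor
          · intro hp
            rcases List.mem_append.mp hp with hp | hp
            · obtain ⟨hpx, hpid⟩ := (herase p).mp hp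
              obtain ⟨hpQ, hpT⟩ := (hidx p).mp hpid
              refine ⟨(hQ1 p).mpr (Or.inl hpQ), fun hmem => ?_⟩
              rcases (hmemT1 p).mp hmem with hc | hc
              · exact hpT hc
              · exact hpx hc
            · rw [List.mem_singleton] at hp; subst hp
              refine ⟨(hQ1 _).mpr (Or.inr (Or.inr ⟨rfl, hC2.1⟩)), fun hmem => ?_⟩
              rcases (hmemT1 _).mp hmem with hc | hc
              · exact hC2.2 (hT _ hc)
              · exact hu2nx hc
          · rintro ⟨hpQ, hpT⟩
            have hpx : p ≠ x := fun hc => hpT ((hmemT1 p).mpr (Or.inr hc))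
            have hfromQ : pvQ A B n t p → p ∈ idxs.erase x ++ [(x.1, x.2+1)] := by
              intro hq
              have hpid : p ∈ idxs := (hidx p).mpr
                ⟨hq, fun hmem => hpT ((hmemT1 p).mpr (Or.inl hmem))⟩
              exact List.mem_append.mpr (Or.inl ((herase p).mpr ⟨hpx, hpid⟩))
            rcases (hQ1 p).mp hpQ with hq | hq | hq
            · exact hfromQ hq
            · exact hfromQ (hq.1 ▸ hnC1 hq.2)
            · exact List.mem_append.mpr (Or.inr (List.mem_singleton.mpr hq.1))
        · intro p
          rw [PySem.Set.mem_add, hps p]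
          constructor
          · rintro (⟨hq, hne⟩ | rfl)
            · exact ⟨(hQ1 p).mpr (Or.inl hq), hne⟩
            · exact ⟨(hQ1 _).mpr (Or.inr (Or.inr ⟨rfl, hC2.1⟩)), by simp⟩
          · rintro ⟨hpQ, hne⟩
            rcases (hQ1 p).mp hpQ with hq | hq | hq
            · exact Or.inl ⟨hq, hne⟩
            · exact Or.inl ⟨hq.1 ▸ hnC1 hq.2, hne⟩
            · exact Or.inr hq.1
    · -- neither pushed
      have hnC2 : x.2 + 1 < n → pvQ A B n t (x.1, x.2 + 1) := by
        intro hb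
        by_contra hq
        exact hC2 ⟨hb, hq⟩
      have hg2 : ¬ ((decide (x.2 + 1 < n) && !PySem.Set.contains ps (x.1, x.2+1)) = true) := by
        intro hg
        rw [Bool.and_eq_true, Bool.not_eq_true'] at hg
        refine hC2 ⟨of_decide_eq_true hg.1, fun hq => ?_⟩
        rw [hcont2.mpr hq] at hg
        exact absurd hg.2 (by simp)
      refine ⟨(idxs.erase x).map (pvEnt A B), ps,
        res ++ [(A.getD x.1 0, B.getD x.2 0)], ?_, ?_⟩
      · simp only [pvLoop, hpop, hE1, hE2]
        rw [if_neg hg1]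
        dsimp only
        rw [if_neg hg2]
      · refine ⟨hres', ⟨idxs.erase x, rfl, hnd.erase x, ?_⟩, ?_, hT'⟩
        · intro p
          constructor
          · intro hp
            obtain ⟨hpx, hpid⟩ := (herase p).mp hp
            obtain ⟨hpQ, hpT⟩ := (hidx p).mp hpid
            refine ⟨(hQ1 p).mpr (Or.inl hpQ), fun hmem => ?_⟩
            rcases (hmemT1 p).mp hmem with hc | hc
            · exact hpT hc
            · exact hpx hc
          · rintro ⟨hpQ, hpT⟩
            have hpx : p ≠ x := fun hc => hpT ((hmemT1 p).mpr (Or.inr hc))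
            have hfromQ : pvQ A B n t p → p ∈ idxs.erase x := by
              intro hq
              have hpid : p ∈ idxs := (hidx p).mpr
                ⟨hq, fun hmem => hpT ((hmemT1 p).mpr (Or.inl hmem))⟩
              exact (herase p).mpr ⟨hpx, hpid⟩
            rcases (hQ1 p).mp hpQ with hq | hq | hq
            · exact hfromQ hq
            · exact hfromQ (hq.1 ▸ hnC1 hq.2)
            · exact hfromQ (hq.1 ▸ hnC2 hq.2)
        · intro p
          rw [hps p]
          constructor
          · rintro ⟨hq, hne⟩
            exact ⟨(hQ1 p).mpr (Or.inl hq), hne⟩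
          · rintro ⟨hpQ, hne⟩
            rcases (hQ1 p).mp hpQ with hq | hq | hq
            · exact ⟨hq, hne⟩
            · exact ⟨hq.1 ▸ hnC1 hq.2, hne⟩
            · exact ⟨hq.1 ▸ hnC2 hq.2, hne⟩


lemma pvLoop_inv (A B : List Int) (n : Nat) (hn : 0 < n)
    (hAl : n ≤ A.length) (hBl : n ≤ B.length)
    (hA : A.Pairwise (· ≤ ·)) (hB : B.Pairwise (· ≤ ·)) :
    ∀ fuel t h ps res, t + fuel = n → pvInv A B n t h ps res →
      pvLoop A B n fuel h ps res = ((pvSortedG A B n).take n).map (pvVal A B) := by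
  intro fuel
  induction fuel with
  | zero =>
    intro t h ps res htn hinv
    have ht : t = n := by omega
    rw [show pvLoop A B n 0 h ps res = res from rfl, hinv.1, ht]
  | succ fuel ih =>
    intro t h ps res htn hinv
    obtain ⟨h', ps', res', heq, hinv'⟩ :=
      pvStep A B n t hn (by omega) hAl hBl hA hB fuel h ps res hinv
    rw [heq]
    exact ih (t+1) h' ps' res' (by omega) hinv'

lemma pvSorted2_eq (xs : List (Int × Int)) :
    PySem.List.sorted2 xs (fun p => p.1 + p.2) (fun p => p.2) false
      = PySem.List.sorted xs pvKey2 false := by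
  simp only [PySem.List.sorted2, PySem.List.sorted, Bool.false_eq_true, if_false]
  congr 1
  funext acc x
  congr 1
  funext a b
  rw [Bool.eq_iff_iff]
  simp only [Bool.or_eq_true, Bool.and_eq_true, Bool.not_eq_true', decide_eq_true_eq,
    decide_eq_false_iff_not, pvKey2, Prod.Lex.toLex_lt_toLex]
  omega

lemma pvLists_eq (A B : List Int) (n : Nat) :
    ((pvSortedG A B n).map (pvVal A B))
      = PySem.List.sorted ((pvGrid n).map (pvVal A B)) pvKey2 false := by
  have hperm : ((pvSortedG A B n).map (pvVal A B)).Perm ((pvGrid n).map (pvVal A B)) :=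
    (PySem.List.sorted_perm (pvGrid n) (pvF A B) false).map _
  have hperm2 : (PySem.List.sorted ((pvGrid n).map (pvVal A B)) pvKey2 false).Perm
      ((pvGrid n).map (pvVal A B)) := PySem.List.sorted_perm _ _ _
  refine PySem.List.eq_of_perm_of_pairwise_le_of_injective pvKey2 pvKey2_injective
    (hperm.trans hperm2.symm) ?_ ?_
  · rw [List.pairwise_map]
    exact (PySem.List.sorted_pairwise (pvGrid n) (pvF A B)).imp
      (fun hab => pvKey2_le_of_pvF_le A B _ _ hab)
  · exact PySem.List.sorted_pairwise _ pvKey2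

lemma nbestc_unfold (a b : List Int) (ha : ¬ a.length = 0) :
    nbestc a b = pvLoop (PySem.List.sorted a (fun x => x) false)
      (PySem.List.sorted b (fun x => x) false) a.length a.length
      [pvEnt (PySem.List.sorted a (fun x => x) false) (PySem.List.sorted b (fun x => x) false) (0, 0)]
      PySem.Set.empty [] := by
  simp only [nbestc, if_neg ha]
  rfl

lemma nbestc_alt_unfold (a b : List Int) (ha : ¬ a.length = 0) :
    nbestc_alt a b = PySem.List.slice
      (PySem.List.sorted2 ((pvGrid a.length).map
        (pvVal (PySem.List.sorted a (fun x => x) false) (PySem.List.sorted b (fun x => x) false)))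
        (fun p => p.1 + p.2) (fun p => p.2) false)
      none (some (a.length : Int)) := by
  simp only [nbestc_alt, if_neg ha]
  congr 1
  simp only [pvGrid, List.map_flatMap, List.map_map]
  rfl

lemma pvInv0 (A B : List Int) (n : Nat) : pvInv A B n 0 [pvEnt A B (0, 0)] PySem.Set.empty [] := by
  refine ⟨by simp, ⟨[(0, 0)], rfl, by simp, ?_⟩, ?_, by simp⟩
  · intro p
    simp [pvQ]
  · intro p
    constructor
    · intro hp
      exact absurd hp (List.not_mem_nil)
    · rintro ⟨hq, hne⟩
      simp only [pvQ] at hq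
      rcases hq with rfl | ⟨q, hq, _⟩
      · exact absurd rfl hne
      · simp at hq

-- ===== VERDICT (by name: the statement is the Claim_ definition above) =====
theorem nbestc_spec : Claim_equal_nbestc := by
  intro a b _hdom hpre
  unfold Spec_nbestc
  by_cases ha : a.length = 0
  · rw [List.length_eq_zero_iff] at ha
    subst ha
    rfl
  · have hn : 0 < a.length := Nat.pos_of_ne_zero ha
    have hba : a.length ≤ b.length := by
      rcases hpre with hc | hc
      · exact absurd (by rw [hc]; rfl) ha
      · exact hc
    have hAl : a.length ≤ (PySem.List.sorted a (fun x => x) false).length := by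
      rw [PySem.List.length_sorted]
    have hBl : a.length ≤ (PySem.List.sorted b (fun x => x) false).length := by
      rw [PySem.List.length_sorted]; exact hba
    have hA : (PySem.List.sorted a (fun x => x) false).Pairwise (· ≤ ·) := by
      simpa using PySem.List.sorted_pairwise a (fun x => x)
    have hB : (PySem.List.sorted b (fun x => x) false).Pairwise (· ≤ ·) := by
      simpa using PySem.List.sorted_pairwise b (fun x => x)
    rw [nbestc_unfold a b ha, nbestc_alt_unfold a b ha]
    rw [pvLoop_inv (PySem.List.sorted a (fun x => x) false) (PySem.List.sorted b (fun x => x) false)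
      a.length hn hAl hBl hA hB a.length 0 _ _ _ (by omega)
      (pvInv0 (PySem.List.sorted a (fun x => x) false) (PySem.List.sorted b (fun x => x) false) a.length)]
    rw [pvSorted2_eq, ← pvLists_eq]
    rw [PySem.List.slice_to _ (Int.natCast_nonneg _)]
    rw [List.map_take]
    simp
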